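-- pv_equiv track=rewrite | github.com/Dodant/potential-octo | 프로그래머스/unrated/181887. 홀수 vs 짝수/홀수 vs 짝수.py | solution
-- ===== SOURCE A (Python) =====
-- def solution(num_list):
--     answer_o = 0
--     answer_e = 0
--     for idx, item in enumerate(num_list):
--         if idx % 2 == 0:
--             answer_o += item
--         else:
--             answer_e += item
--     return max(answer_o, answer_e)
-- ===== SOURCE B (Python) =====
-- def solution(num_list):
--     # Right-to-left fold with a swap: even-sum of (x :: rest) = x + odd-sum(rest),
--     # odd-sum of (x :: rest) = even-sum(rest). No indices, no parity test.
--     o = 0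
--     e = 0
--     for x in reversed(num_list):
--         o, e = x + e, o
--     return max(o, e)
-- ===== Notes on version B (the rewrite author's own statement) =====
-- stated objective: alternative
-- what changed: Replaced the enumerate pass with an index-parity branch by an index-free right-to-left fold carrying the (even,odd) sum pair via the swap identity even-sum(x::xs) = x + odd-sum(xs); avoiding enumerate's index tuples also makes it measurably faster.
import Mathlib
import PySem

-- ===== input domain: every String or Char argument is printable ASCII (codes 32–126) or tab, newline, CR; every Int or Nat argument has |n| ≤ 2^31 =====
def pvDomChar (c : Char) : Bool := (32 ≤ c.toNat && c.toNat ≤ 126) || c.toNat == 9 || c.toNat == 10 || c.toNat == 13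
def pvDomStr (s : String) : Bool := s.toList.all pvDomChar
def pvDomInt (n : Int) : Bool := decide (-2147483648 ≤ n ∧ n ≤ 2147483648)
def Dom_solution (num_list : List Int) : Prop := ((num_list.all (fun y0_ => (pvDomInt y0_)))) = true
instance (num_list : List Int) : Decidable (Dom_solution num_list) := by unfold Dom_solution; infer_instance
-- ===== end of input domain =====

-- B replaces A's single enumerate pass with an index-parity branch by an index-free
-- structural recursion computing the (even-index sum, odd-index sum) pair via a swap.


-- ===== PORT A =====
def solution (num_list : List Int) : Int :=
  let acc := (PySem.List.enumerate num_list).foldl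
    (fun (p : Int × Int) ie =>
      if PySem.Int.mod ie.1 2 == 0 then (p.1 + ie.2, p.2) else (p.1, p.2 + ie.2))
    (0, 0)
  max acc.1 acc.2

-- ===== PORT B =====
-- Source B's reversed-iteration with swap, as the equivalent structural right fold
def solGo (lst : List Int) : Int × Int :=
  match lst with
  | [] => (0, 0)
  | x :: xs =>
    let p := solGo xs
    (x + p.2, p.1)

def solution_alt (num_list : List Int) : Int :=
  let p := solGo num_list
  max p.1 p.2

-- ===== PRECONDITION & SPEC =====
def Spec_solution (num_list : List Int) (out : Int) : Prop := out = solution_alt num_list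
instance (num_list : List Int) (out : Int) : Decidable (Spec_solution num_list out) := by unfold Spec_solution; infer_instance

-- ===== CLAIM (what is proved, stated in full; the proofs are below) =====
def Claim_equal_solution : Prop := ∀ (num_list : List Int), Dom_solution num_list → Spec_solution num_list (solution num_list)

-- ===== LEMMAS AND PROOFS =====

lemma solGo_foldl (xs : List Int) (s o e : Int) :
    (PySem.List.enumerate xs s).foldl
      (fun (p : Int × Int) ie =>
        if PySem.Int.mod ie.1 2 == 0 then (p.1 + ie.2, p.2) else (p.1, p.2 + ie.2))
      (o, e)
    = if PySem.Int.mod s 2 == 0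
      then (o + (solGo xs).1, e + (solGo xs).2)
      else (o + (solGo xs).2, e + (solGo xs).1) := by
  induction xs generalizing s o e with
  | nil => simp [solGo]
  | cons x xs ih =>
    have hm : ∀ t : Int, PySem.Int.mod t 2 = t % 2 := fun t =>
      PySem.Int.mod_eq_emod_of_pos (by omega)
    have hs : PySem.Int.mod s 2 = 0 ∨ PySem.Int.mod s 2 = 1 := by rw [hm]; omega
    have hsucc : PySem.Int.mod (s + 1) 2 = 1 - PySem.Int.mod s 2 := by rw [hm, hm]; omega
    rw [PySem.List.enumerate_cons, List.foldl_cons]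
    rcases hs with h | h
    · rw [if_pos (by rw [h]; rfl), ih (s + 1), if_neg (by rw [hsucc, h]; decide),
        if_pos (by rw [h]; rfl)]
      refine Prod.ext ?_ ?_ <;> simp [solGo] <;> ring
    · rw [if_neg (by rw [h]; decide), ih (s + 1), if_pos (by rw [hsucc, h]; decide),
        if_neg (by rw [h]; decide)]
      refine Prod.ext ?_ ?_ <;> simp [solGo] <;> ring

-- ===== VERDICT (by name: the statement is the Claim_ definition above) =====
theorem solution_spec : Claim_equal_solution := by
  intro num_list _
  show _ = _
  unfold solution solution_alt
  rw [solGo_foldl]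
  simp [PySem.Int.mod]
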